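-- pv_equiv track=rewrite | github.com/BradySRatzmann/Pokemon2026VGCDataAnalysis | main.py | cleaned_or_Combined
-- ===== SOURCE A (Python) =====
-- def cleaned_or_Combined(words: list[str], remove: list[str]):
--     cleaned = []
--     i = 0
--
--     def is_int(s):
--         try:
--             int(s)
--             return True
--         except ValueError:
--             return False
--
--     while i < len(words):
--         if words[i] in remove or is_int(words[i]):
--             i += 1
--             continue
--
--         combined = [words[i]]
--         j = i + 1
--         while j < len(words) and words[j] not in remove and not is_int(words[j]):
--             combined.append(words[j])
--             j += 1
--
--         cleaned.append("-".join(combined))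
--         i = j
--     return cleaned
-- ===== SOURCE B (Python) =====
-- def cleaned_or_Combined(words: list[str], remove: list[str]):
--     def is_int(s):
--         try:
--             int(s)
--             return True
--         except ValueError:
--             return False
--
--     cleaned = []
--     buffer = []
--     for w in words:
--         if w in remove or is_int(w):
--             if buffer:
--                 cleaned.append("-".join(buffer))
--                 buffer = []
--         else:
--             buffer.append(w)
--     if buffer:
--         cleaned.append("-".join(buffer))
--     return cleaned
-- ===== Notes on version B (the rewrite author's own statement) =====
-- stated objective: simpler
-- what changed: Replaced the index-based outer loop with a scan-ahead inner while-loop by a single flat for-loop that keeps a running buffer and flushes it at each separator and at the end.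
import Mathlib
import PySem

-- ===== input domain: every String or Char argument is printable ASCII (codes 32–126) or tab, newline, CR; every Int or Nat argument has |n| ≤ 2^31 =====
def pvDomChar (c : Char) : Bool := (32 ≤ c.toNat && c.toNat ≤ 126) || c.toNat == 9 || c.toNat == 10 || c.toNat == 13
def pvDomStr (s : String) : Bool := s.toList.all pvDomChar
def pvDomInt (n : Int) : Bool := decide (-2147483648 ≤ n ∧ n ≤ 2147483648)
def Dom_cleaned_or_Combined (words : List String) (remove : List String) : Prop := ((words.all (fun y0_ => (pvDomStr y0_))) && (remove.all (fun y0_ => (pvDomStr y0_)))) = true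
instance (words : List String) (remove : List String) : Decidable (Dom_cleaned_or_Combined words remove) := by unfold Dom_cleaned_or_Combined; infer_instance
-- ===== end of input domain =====

-- B replaces A's index-based outer loop with nested scan-ahead by one flat pass with a running buffer (objective: simpler).


-- ===== PORT A =====
-- is_int(s): int(s) raising ValueError ↔ PySem.Int.ofStr? s = none (exact)
def pvIsInt (s : String) : Bool := (PySem.Int.ofStr? s).isSome

-- the inner while loop: j, combined; returns (combined, j) at exit.
-- words[j] is read via getD under the guard j < words.length, where Python indexing returns that element (exact).
def pvAInner (words : List String) (remove : List String) (j : Nat) (combined : List String) :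
    List String × Nat :=
  if j < words.length then
    if !(remove.contains (words.getD j "")) && !(pvIsInt (words.getD j "")) then
      pvAInner words remove (j + 1) (combined ++ [words.getD j ""])
    else (combined, j)
  else (combined, j)
termination_by words.length - j

-- termination fact the outer loop's well-foundedness needs: the inner loop never moves j backwards
theorem pvAInner_le (words remove : List String) (j : Nat) (combined : List String) :
    j ≤ (pvAInner words remove j combined).2 := by
  rw [pvAInner]
  split
  · split
    · exact Nat.le_trans (Nat.le_succ j) (pvAInner_le words remove (j+1) _)
    · exact Nat.le_refl j
  · exact Nat.le_refl j
termination_by words.length - j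

-- the outer while loop: i, cleaned
def pvALoop (words : List String) (remove : List String) (i : Nat) (cleaned : List String) :
    List String :=
  if i < words.length then
    if remove.contains (words.getD i "") || pvIsInt (words.getD i "") then
      pvALoop words remove (i + 1) cleaned
    else
      pvALoop words remove (pvAInner words remove (i + 1) [words.getD i ""]).2
        (cleaned ++ [PySem.Str.join "-" (pvAInner words remove (i + 1) [words.getD i ""]).1])
  else cleaned
termination_by words.length - i
decreasing_by
  · omega
  · have := pvAInner_le words remove (i+1) [words.getD i ""]
    omega

def cleaned_or_Combined (words : List String) (remove : List String) : List String :=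
  pvALoop words remove 0 []

-- ===== PORT B =====
-- one step of B's flat for-loop over (cleaned, buffer)
def pvBStep (remove : List String) (st : List String × List String) (w : String) :
    List String × List String :=
  if remove.contains w || pvIsInt w then
    (if st.2.isEmpty then st.1 else st.1 ++ [PySem.Str.join "-" st.2], [])
  else (st.1, st.2 ++ [w])

-- final flush after the loop
def pvBFlush (st : List String × List String) : List String :=
  if st.2.isEmpty then st.1 else st.1 ++ [PySem.Str.join "-" st.2]

def cleaned_or_Combined_alt (words : List String) (remove : List String) : List String :=
  pvBFlush (words.foldl (pvBStep remove) ([], []))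

-- ===== PRECONDITION & SPEC =====
def Spec_cleaned_or_Combined (words : List String) (remove : List String) (out : List String) : Prop := out = cleaned_or_Combined_alt words remove
instance (words : List String) (remove : List String) (out : List String) : Decidable (Spec_cleaned_or_Combined words remove out) := by unfold Spec_cleaned_or_Combined; infer_instance

-- ===== CLAIM (what is proved, stated in full; the proofs are below) =====
def Claim_equal_cleaned_or_Combined : Prop := ∀ (words : List String) (remove : List String), Dom_cleaned_or_Combined words remove → Spec_cleaned_or_Combined words remove (cleaned_or_Combined words remove)

-- ===== LEMMAS AND PROOFS =====

-- B's fold-then-flush starting from state (cleaned, buf) on a suffix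
def pvBRun (remove : List String) (rest : List String) (cleaned buf : List String) : List String :=
  pvBFlush (rest.foldl (pvBStep remove) (cleaned, buf))

theorem pvBRun_nil (remove : List String) (cleaned buf : List String) :
    pvBRun remove [] cleaned buf = pvBFlush (cleaned, buf) := rfl

theorem pvBRun_cons (remove : List String) (w : String) (rest cleaned buf : List String) :
    pvBRun remove (w :: rest) cleaned buf
      = pvBRun remove rest (pvBStep remove (cleaned, buf) w).1 (pvBStep remove (cleaned, buf) w).2 := rfl

theorem drop_eq_cons (words : List String) (i : Nat) (h : i < words.length) :
    words.drop i = words.getD i "" :: words.drop (i + 1) := by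
  rw [List.getD_eq_getElem words "" h]
  exact List.drop_eq_getElem_cons h

theorem pvBFlush_ne (cleaned buf : List String) (h : buf ≠ []) :
    pvBFlush (cleaned, buf) = cleaned ++ [PySem.Str.join "-" buf] := by
  unfold pvBFlush
  simp [List.isEmpty_iff, h]

-- the inner loop, followed by appending the joined run and continuing the outer loop,
-- equals B's buffered fold on the corresponding suffix
theorem pvQ (words remove : List String) (j : Nat) (combined cleaned : List String)
    (hne : combined ≠ [])
    (hP : ∀ k c, j ≤ k → pvALoop words remove k c = pvBRun remove (words.drop k) c []) :
    pvALoop words remove (pvAInner words remove j combined).2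
        (cleaned ++ [PySem.Str.join "-" (pvAInner words remove j combined).1])
      = pvBRun remove (words.drop j) cleaned combined := by
  by_cases hj : j < words.length
  · rw [drop_eq_cons words j hj, pvBRun_cons]
    by_cases hsep : (remove.contains (words.getD j "") || pvIsInt (words.getD j "")) = true
    · -- separator: inner loop stops at j with current combined; B flushes
      have hc : (!remove.contains (words.getD j "") && !pvIsInt (words.getD j "")) = false := by
        cases h1 : remove.contains (words.getD j "") <;>
          cases h2 : pvIsInt (words.getD j "") <;> simp_all
      have hinner : pvAInner words remove j combined = (combined, j) := by
        rw [pvAInner, if_pos hj, hc]; simp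
      have hstep : pvBStep remove (cleaned, combined) (words.getD j "")
          = (cleaned ++ [PySem.Str.join "-" combined], []) := by
        unfold pvBStep
        rw [hsep]
        simp [List.isEmpty_iff, hne]
      rw [hinner, hstep]
      show pvALoop words remove j (cleaned ++ [PySem.Str.join "-" combined])
        = pvBRun remove (words.drop (j + 1)) (cleaned ++ [PySem.Str.join "-" combined]) []
      rw [hP j (cleaned ++ [PySem.Str.join "-" combined]) (Nat.le_refl j),
        drop_eq_cons words j hj, pvBRun_cons]
      have hstep2 : pvBStep remove (cleaned ++ [PySem.Str.join "-" combined], []) (words.getD j "")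
          = (cleaned ++ [PySem.Str.join "-" combined], []) := by
        unfold pvBStep
        rw [hsep]; simp
      rw [hstep2]
    · -- run continues: inner loop consumes words[j]; B appends it to the buffer
      have hb : (remove.contains (words.getD j "") || pvIsInt (words.getD j "")) = false :=
        Bool.not_eq_true _ ▸ eq_false_of_ne_true hsep
      have hc : (!remove.contains (words.getD j "") && !pvIsInt (words.getD j "")) = true := by
        cases h1 : remove.contains (words.getD j "") <;>
          cases h2 : pvIsInt (words.getD j "") <;> simp_all
      have hinner : pvAInner words remove j combined
          = pvAInner words remove (j + 1) (combined ++ [words.getD j ""]) := by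
        conv_lhs => rw [pvAInner]
        rw [if_pos hj, hc]; simp
      have hstep : pvBStep remove (cleaned, combined) (words.getD j "")
          = (cleaned, combined ++ [words.getD j ""]) := by
        unfold pvBStep
        rw [hb]; simp
      rw [hinner, hstep]
      exact pvQ words remove (j + 1) (combined ++ [words.getD j ""]) cleaned (by simp)
        (fun k c hk => hP k c (Nat.le_trans (Nat.le_succ j) hk))
  · -- j past the end: inner loop stops, B flushes at the end of the list
    have hinner : pvAInner words remove j combined = (combined, j) := by
      rw [pvAInner, if_neg hj]
    rw [hinner, List.drop_eq_nil_of_le (Nat.le_of_not_lt hj), pvBRun_nil,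
      hP j _ (Nat.le_refl j), List.drop_eq_nil_of_le (Nat.le_of_not_lt hj), pvBRun_nil]
    rw [pvBFlush_ne _ _ hne]
    unfold pvBFlush
    simp
termination_by words.length - j

-- the outer loop from index i with empty buffer equals B's fold-then-flush on the suffix
theorem pvP (words remove : List String) (n i : Nat) (cleaned : List String)
    (hn : words.length - i ≤ n) :
    pvALoop words remove i cleaned = pvBRun remove (words.drop i) cleaned [] := by
  induction n generalizing i cleaned with
  | zero =>
      have hi : ¬ i < words.length := by omega
      rw [pvALoop, if_neg hi, List.drop_eq_nil_of_le (by omega), pvBRun_nil]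
      simp [pvBFlush]
  | succ n ih =>
      by_cases hi : i < words.length
      · rw [drop_eq_cons words i hi, pvBRun_cons]
        by_cases hsep : (remove.contains (words.getD i "") || pvIsInt (words.getD i "")) = true
        · -- separator with empty buffer: both sides just advance
          have hA : pvALoop words remove i cleaned = pvALoop words remove (i + 1) cleaned := by
            conv_lhs => rw [pvALoop]
            rw [if_pos hi, hsep]; simp
          have hstep : pvBStep remove (cleaned, []) (words.getD i "") = (cleaned, []) := by
            unfold pvBStep
            rw [hsep]; simp
          rw [hA, hstep]
          exact ih (i + 1) cleaned (by omega)
        · -- start of a run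
          have hb : (remove.contains (words.getD i "") || pvIsInt (words.getD i "")) = false :=
            Bool.not_eq_true _ ▸ eq_false_of_ne_true hsep
          have hA : pvALoop words remove i cleaned
              = pvALoop words remove (pvAInner words remove (i + 1) [words.getD i ""]).2
                  (cleaned ++ [PySem.Str.join "-" (pvAInner words remove (i + 1) [words.getD i ""]).1]) := by
            conv_lhs => rw [pvALoop]
            rw [if_pos hi, hb]; simp
          have hstep : pvBStep remove (cleaned, []) (words.getD i "")
              = (cleaned, [words.getD i ""]) := by
            unfold pvBStep
            rw [hb]; simp
          rw [hA, hstep]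
          exact pvQ words remove (i + 1) [words.getD i ""] cleaned (by simp)
            (fun k c hk => ih k c (by omega))
      · rw [pvALoop, if_neg hi, List.drop_eq_nil_of_le (Nat.le_of_not_lt hi), pvBRun_nil]
        simp [pvBFlush]

-- ===== VERDICT (by name: the statement is the Claim_ definition above) =====
theorem cleaned_or_Combined_spec : Claim_equal_cleaned_or_Combined := by
  intro words remove _
  unfold Spec_cleaned_or_Combined cleaned_or_Combined cleaned_or_Combined_alt
  have := pvP words remove words.length 0 [] (by omega)
  rw [this]
  rfl
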